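-- pv_equiv track=rewrite | github.com/ourSSUNG/CodeSignalPractice | InterviewPractice/HashTables/areFollowingPatterns.py | areFollowingPatterns
-- ===== SOURCE A (Python) =====
-- def areFollowingPatterns(strings, patterns):
--     dic = {}
--     i = 0
--     while( i < len(strings)):
--         if strings[i] in dic:
--             dic[strings[i]].append(patterns[i])
--         else:
--             dic[strings[i]] = [patterns[i]]
--         i = i+ 1
--     klist = list(dic.keys())
--     b = 0
--     for i in range(0,len(klist)):
--         for j in range(0,len(dic[klist[i]])-1):
--             if dic[klist[i]][j] != dic[klist[i]][j+1]:
--                 b = 1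
--                 break
--
--     dic = {}
--     i = 0
--     while( i < len(patterns)):
--         if patterns[i] in dic:
--             dic[patterns[i]].append(strings[i])
--         else:
--             dic[patterns[i]] = [strings[i]]
--         i = i+ 1
--     klist = list(dic.keys())
--
--     for i in range(0,len(klist)):
--         for j in range(0,len(dic[klist[i]])-1):
--             if dic[klist[i]][j] != dic[klist[i]][j+1]:
--                 b = 1
--                 break
--
--     if b ==1:
--         return False
--     else:
--         return True
-- ===== SOURCE B (Python) =====
-- def areFollowingPatterns(strings, patterns):
--     s2p = {}
--     p2s = {}
--     for s, p in zip(strings, patterns):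
--         if s2p.setdefault(s, p) != p:
--             return False
--         if p2s.setdefault(p, s) != s:
--             return False
--     return True
-- ===== Notes on version B (the rewrite author's own statement) =====
-- stated objective: simpler
-- what changed: Replaced A's two grouping passes (build a dict of value-lists per key, then scan each list for adjacent mismatches, twice) by a single zip pass maintaining two first-seen maps (string->pattern, pattern->string) with early return on the first conflict.
import Mathlib
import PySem

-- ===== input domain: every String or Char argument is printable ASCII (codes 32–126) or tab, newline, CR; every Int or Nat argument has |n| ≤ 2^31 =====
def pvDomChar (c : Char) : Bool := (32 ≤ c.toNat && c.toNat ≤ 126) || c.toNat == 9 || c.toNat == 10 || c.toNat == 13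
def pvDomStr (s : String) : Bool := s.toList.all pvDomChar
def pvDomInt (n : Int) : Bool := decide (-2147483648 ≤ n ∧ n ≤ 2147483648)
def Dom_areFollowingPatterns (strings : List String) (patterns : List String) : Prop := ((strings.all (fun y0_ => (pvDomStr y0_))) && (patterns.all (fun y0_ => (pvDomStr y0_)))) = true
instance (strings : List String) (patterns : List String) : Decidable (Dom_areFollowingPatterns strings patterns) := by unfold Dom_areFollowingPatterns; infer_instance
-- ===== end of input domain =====

-- B replaces A's two grouping passes and adjacent-mismatch scans by one zip pass over two
-- first-seen maps with early return (objective: simpler).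

-- ===== PORT A =====
-- A's while-loop builds dic: group vals by key, in order; indices are in range under Pre_
-- (outside Pre_ the Python raises IndexError; getD's default is never read inside Pre_).
def aBuild (keys : List String) (vals : List String) : PySem.Dict String (List String) :=
  (List.range keys.length).foldl
    (fun d i =>
      let s := keys.getD i ""
      let p := vals.getD i ""
      if d.contains s then d.modify s [] (fun g => g ++ [p]) else d.insert s [p])
    PySem.Dict.empty

-- inner 'for j in range(0, len-1): if g[j] != g[j+1]: b = 1; break'
def aScanRow (g : List String) : List Nat → Nat → Nat
  | [], b => b
  | j :: rest, b => if g.getD j "" ≠ g.getD (j+1) "" then 1 else aScanRow g rest b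

-- 'for i in range(0, len(klist)): <inner scan of dic[klist[i]]>'
def aCheck (d : PySem.Dict String (List String)) (b : Nat) : Nat :=
  d.keys.foldl (fun b k => aScanRow (d.getD k []) (List.range ((d.getD k []).length - 1)) b) b

def areFollowingPatterns (strings : List String) (patterns : List String) : Bool :=
  let dic1 := aBuild strings patterns
  let b1 := aCheck dic1 0
  let dic2 := aBuild patterns strings
  let b2 := aCheck dic2 b1
  if b2 == 1 then false else true

-- ===== PORT B =====
-- 'for s, p in zip(strings, patterns): if s2p.setdefault(s,p) != p or p2s.setdefault(p,s) != s: return False'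
def bGo : List (String × String) → PySem.Dict String String → PySem.Dict String String → Bool
  | [], _, _ => true
  | (s, p) :: rest, s2p, p2s =>
    let v1 := (s2p.get? s).getD p
    let s2p' := s2p.setdefault s p
    if v1 ≠ p then false
    else
      let v2 := (p2s.get? p).getD s
      let p2s' := p2s.setdefault p s
      if v2 ≠ s then false else bGo rest s2p' p2s'

def areFollowingPatterns_alt (strings : List String) (patterns : List String) : Bool :=
  bGo (strings.zip patterns) PySem.Dict.empty PySem.Dict.empty

-- ===== PRECONDITION & SPEC =====
-- Pre_: A indexes patterns[i] for i < len(strings) and strings[i] for i < len(patterns),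
-- so it raises IndexError exactly when the lengths differ; those inputs are excluded.
def Pre_areFollowingPatterns (strings : List String) (patterns : List String) : Prop :=
  strings.length = patterns.length
instance (strings : List String) (patterns : List String) : Decidable (Pre_areFollowingPatterns strings patterns) := by unfold Pre_areFollowingPatterns; infer_instance

def pvWitness_areFollowingPatterns : List String × List String := (["a", "b", "a"], ["x", "y", "x"])

def Spec_areFollowingPatterns (strings : List String) (patterns : List String) (out : Bool) : Prop := out = areFollowingPatterns_alt strings patterns
instance (strings : List String) (patterns : List String) (out : Bool) : Decidable (Spec_areFollowingPatterns strings patterns out) := by unfold Spec_areFollowingPatterns; infer_instance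

-- ===== CLAIM (what is proved, stated in full; the proofs are below) =====
def Claim_equal_areFollowingPatterns : Prop := ∀ (strings : List String) (patterns : List String), Dom_areFollowingPatterns strings patterns → Pre_areFollowingPatterns strings patterns → Spec_areFollowingPatterns strings patterns (areFollowingPatterns strings patterns)

-- ===== LEMMAS AND PROOFS =====

-- the common semantic target: the pair list is consistent in both directions
def Consist (l : List (String × String)) : Prop :=
  ∀ a ∈ l, ∀ b ∈ l, (a.1 = b.1 → a.2 = b.2) ∧ (a.2 = b.2 → a.1 = b.1)

def zstep (d : PySem.Dict String (List String)) (q : String × String) : PySem.Dict String (List String) :=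
  if d.contains q.1 then d.modify q.1 [] (fun g => g ++ [q.2]) else d.insert q.1 [q.2]

theorem foldl_range_getD {α β : Type} (g : β → α → β) (df : α) :
    ∀ (l : List α) (init : β),
      (List.range l.length).foldl (fun d i => g d (l.getD i df)) init = l.foldl g init := by
  intro l
  induction l with
  | nil => intro init; simp
  | cons x t ih =>
    intro init
    simp only [List.length_cons, List.range_succ_eq_map, List.foldl_cons, List.getD_cons_zero,
      List.foldl_map, List.getD_cons_succ]
    exact ih (g init x)

theorem aBuild_eq_zfold (keys vals : List String) (h : keys.length = vals.length) :
    aBuild keys vals = (keys.zip vals).foldl zstep PySem.Dict.empty := by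
  have hz : (keys.zip vals).length = keys.length := by
    simp [List.length_zip, h]
  unfold aBuild
  rw [← hz, ← foldl_range_getD zstep ("", "") (keys.zip vals) PySem.Dict.empty]
  apply PySem.List.foldl_congr_mem
  intro acc i hi
  have hilt : i < (keys.zip vals).length := by simpa using hi
  have hk : i < keys.length := by omega
  have hv : i < vals.length := by omega
  simp [zstep, hk, hv, List.getElem_zip]


theorem getD_zstep (d : PySem.Dict String (List String)) (q : String × String) (k : String) :
    (zstep d q).getD k [] = if k = q.1 then d.getD k [] ++ [q.2] else d.getD k [] := by
  unfold zstep
  by_cases hc : d.contains q.1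
  · simp only [hc, if_true]
    rw [PySem.Dict.getD_modify]
    split_ifs with h
    · subst h; rfl
    · rfl
  · simp only [hc, if_false, Bool.false_eq_true]
    rw [PySem.Dict.getD_insert]
    split_ifs with h
    · subst h
      rw [PySem.Dict.getD_of_not_contains (h := by simpa using hc)]
      rfl
    · rfl

theorem mem_keys_zstep (d : PySem.Dict String (List String)) (q : String × String) (k : String) :
    k ∈ (zstep d q).keys ↔ k ∈ d.keys ∨ k = q.1 := by
  unfold zstep
  by_cases hc : d.contains q.1
  · simp only [hc, if_true]
    rw [PySem.Dict.keys_modify]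
    rw [PySem.Dict.mem_keys_insert]
    tauto
  · simp only [hc, if_false, Bool.false_eq_true]
    rw [PySem.Dict.mem_keys_insert]
    tauto

theorem getD_zfold (l : List (String × String)) :
    ∀ (d : PySem.Dict String (List String)) (k : String),
      (l.foldl zstep d).getD k [] = d.getD k [] ++ (l.filter (fun q => q.1 == k)).map (·.2) := by
  induction l with
  | nil => intro d k; simp
  | cons q t ih =>
    intro d k
    rw [List.foldl_cons, ih, getD_zstep]
    by_cases h : q.1 = k
    · simp [h]
    · have h' : ¬ k = q.1 := fun hh => h hh.symm
      simp [h, h']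

theorem mem_keys_zfold (l : List (String × String)) :
    ∀ (d : PySem.Dict String (List String)) (k : String),
      k ∈ (l.foldl zstep d).keys ↔ k ∈ d.keys ∨ ∃ q ∈ l, q.1 = k := by
  induction l with
  | nil => intro d k; simp
  | cons q t ih =>
    intro d k
    rw [List.foldl_cons, ih, mem_keys_zstep]
    simp only [List.mem_cons]
    constructor
    · rintro ((h | h) | ⟨q', hq', rfl⟩)
      · exact Or.inl h
      · exact Or.inr ⟨q, Or.inl rfl, h.symm⟩
      · exact Or.inr ⟨q', Or.inr hq', rfl⟩
    · rintro (h | ⟨q', (rfl | hq'), rfl⟩)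
      · exact Or.inl (Or.inl h)
      · exact Or.inl (Or.inr rfl)
      · exact Or.inr ⟨q', hq', rfl⟩

theorem aScanRow_eq (g : List String) :
    ∀ (r : List Nat) (b : Nat),
      aScanRow g r b = if ∃ j ∈ r, g.getD j "" ≠ g.getD (j+1) "" then 1 else b := by
  intro r
  induction r with
  | nil => intro b; simp [aScanRow]
  | cons j rest ih =>
    intro b
    rw [aScanRow]
    by_cases h : g.getD j "" ≠ g.getD (j+1) ""
    · rw [if_pos h, if_pos ⟨j, List.mem_cons_self, h⟩]
    · rw [if_neg h, ih]
      by_cases h2 : ∃ x ∈ rest, g.getD x "" ≠ g.getD (x+1) ""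
      · rw [if_pos h2, if_pos]
        obtain ⟨x, hx, hne⟩ := h2
        exact ⟨x, List.mem_cons_of_mem _ hx, hne⟩
      · rw [if_neg h2, if_neg]
        rintro ⟨x, hmem, hne⟩
        rcases List.mem_cons.mp hmem with rfl | hx
        · exact h hne
        · exact h2 ⟨x, hx, hne⟩

theorem foldl_flag (bad : String → Prop) [DecidablePred bad] :
    ∀ (ks : List String) (b : Nat),
      ks.foldl (fun b k => if bad k then 1 else b) b = if ∃ k ∈ ks, bad k then 1 else b := by
  intro ks
  induction ks with
  | nil => intro b; simp
  | cons k rest ih =>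
    intro b
    rw [List.foldl_cons, ih]
    by_cases h2 : ∃ x ∈ rest, bad x
    · rw [if_pos h2, if_pos]
      obtain ⟨x, hx, hb⟩ := h2
      exact ⟨x, List.mem_cons_of_mem _ hx, hb⟩
    · rw [if_neg h2]
      by_cases hk : bad k
      · rw [if_pos hk, if_pos ⟨k, List.mem_cons_self, hk⟩]
      · rw [if_neg hk, if_neg]
        rintro ⟨x, hmem, hb⟩
        rcases List.mem_cons.mp hmem with rfl | hx
        · exact hk hb
        · exact h2 ⟨x, hx, hb⟩

theorem aCheck_eq (d : PySem.Dict String (List String)) (b : Nat) :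
    aCheck d b = if ∃ k ∈ d.keys, ∃ j < (d.getD k []).length - 1,
        (d.getD k []).getD j "" ≠ (d.getD k []).getD (j+1) "" then 1 else b := by
  unfold aCheck
  have h1 : ∀ (b : Nat) (k : String),
      aScanRow (d.getD k []) (List.range ((d.getD k []).length - 1)) b =
      if ∃ j < (d.getD k []).length - 1, (d.getD k []).getD j "" ≠ (d.getD k []).getD (j+1) "" then 1 else b := by
    intro b k
    rw [aScanRow_eq]
    congr 1
    simp [List.mem_range]
  calc d.keys.foldl (fun b k => aScanRow (d.getD k []) (List.range ((d.getD k []).length - 1)) b) b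
      = d.keys.foldl (fun b k => if ∃ j < (d.getD k []).length - 1,
          (d.getD k []).getD j "" ≠ (d.getD k []).getD (j+1) "" then 1 else b) b := by
        apply PySem.List.foldl_congr_mem
        intro acc k _
        exact h1 acc k
    _ = _ := foldl_flag _ d.keys b

theorem adj_const (g : List String) :
    (¬ ∃ j, j + 1 < g.length ∧ g.getD j "" ≠ g.getD (j+1) "") ↔ ∀ x ∈ g, ∀ y ∈ g, x = y := by
  constructor
  · intro h
    have hadj : ∀ j, j + 1 < g.length → g.getD j "" = g.getD (j+1) "" := by
      intro j hj
      by_contra hne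
      exact h ⟨j, hj, hne⟩
    have hhead : ∀ i, i < g.length → g.getD i "" = g.getD 0 "" := by
      intro i
      induction i with
      | zero => intro _; rfl
      | succ n ihn =>
        intro hi
        rw [← hadj n hi, ihn (by omega)]
    intro x hx y hy
    obtain ⟨i, hi, rfl⟩ := List.mem_iff_getElem.mp hx
    obtain ⟨j, hj, rfl⟩ := List.mem_iff_getElem.mp hy
    rw [← List.getD_eq_getElem g "" hi, ← List.getD_eq_getElem g "" hj,
      hhead i hi, hhead j hj]
  · rintro h ⟨j, hj, hne⟩
    apply hne
    have h1 : g.getD j "" ∈ g := by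
      rw [List.getD_eq_getElem g "" (by omega)]; exact List.getElem_mem _
    have h2 : g.getD (j+1) "" ∈ g := by
      rw [List.getD_eq_getElem g "" hj]; exact List.getElem_mem _
    exact h _ h1 _ h2

theorem mem_zip_swap (xs ys : List String) (a b : String) :
    (a, b) ∈ xs.zip ys ↔ (b, a) ∈ ys.zip xs := by
  induction xs generalizing ys with
  | nil => cases ys <;> simp
  | cons x xs ih =>
    cases ys with
    | nil => simp
    | cons y ys => simp [ih, and_comm]

theorem bGo_spec (l : List (String × String)) :
    ∀ (s2p p2s : PySem.Dict String String),
      (∀ s p, s2p.get? s = some p ↔ p2s.get? p = some s) →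
      (bGo l s2p p2s = true ↔
        (Consist l ∧ (∀ q ∈ l, ∀ p', s2p.get? q.1 = some p' → q.2 = p')
          ∧ (∀ q ∈ l, ∀ s', p2s.get? q.2 = some s' → q.1 = s'))) := by
  induction l with
  | nil =>
    intro s2p p2s _
    simp [bGo, Consist]
  | cons q t ih =>
    obtain ⟨s, p⟩ := q
    intro s2p p2s hsym
    rw [bGo]
    rcases h1 : s2p.get? s with _ | p'
    · -- s not yet seen
      have hnc : s2p.contains s = false := by
        rw [PySem.Dict.contains_eq_isSome_get?, h1]; rfl
      have hsd : s2p.setdefault s p = s2p.insert s p :=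
        PySem.Dict.setdefault_of_not_contains s2p p hnc
      simp only [Option.getD_none, hsd, ne_eq, not_true_eq_false, if_false]
      rcases h2 : p2s.get? p with _ | s'
      · -- p not yet seen either: recurse with both inserted
        have hnc2 : p2s.contains p = false := by
          rw [PySem.Dict.contains_eq_isSome_get?, h2]; rfl
        have hsd2 : p2s.setdefault p s = p2s.insert p s :=
          PySem.Dict.setdefault_of_not_contains p2s s hnc2
        simp only [Option.getD_none, hsd2, not_true_eq_false, if_false]
        have hsym' : ∀ a b, (s2p.insert s p).get? a = some b ↔ (p2s.insert p s).get? b = some a := by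
          intro a b
          rw [PySem.Dict.get?_insert, PySem.Dict.get?_insert]
          by_cases ha : a = s <;> by_cases hb : b = p
          · rw [if_pos ha, if_pos hb]; simp [ha, hb]
          · rw [if_pos ha, if_neg hb]
            constructor
            · intro hc; exact absurd (Option.some.inj hc).symm hb
            · intro hc
              have hc' : p2s.get? b = some s := by rw [← ha]; exact hc
              have hx := (hsym s b).mpr hc'
              rw [h1] at hx
              exact absurd hx (by simp)
          · rw [if_neg ha, if_pos hb]
            constructor
            · intro hc
              have hc' : s2p.get? a = some p := by rw [← hb]; exact hc
              have hx := (hsym a p).mp hc'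
              rw [h2] at hx
              exact absurd hx (by simp)
            · intro hc; exact absurd (Option.some.inj hc).symm ha
          · rw [if_neg ha, if_neg hb]; exact hsym a b
        rw [ih _ _ hsym']
        constructor
        · rintro ⟨hcon, hcs, hcp⟩
          refine ⟨?_, ?_, ?_⟩
          · -- Consist ((s,p) :: t)
            intro a ha b hb
            rcases List.mem_cons.mp ha with rfl | ha <;> rcases List.mem_cons.mp hb with rfl | hb
            · exact ⟨fun _ => rfl, fun _ => rfl⟩
            · constructor
              · intro hfst
                exact (hcs b hb p (by rw [PySem.Dict.get?_insert, if_pos hfst.symm])).symm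
              · intro hsnd
                exact (hcp b hb s (by rw [PySem.Dict.get?_insert, if_pos hsnd.symm])).symm
            · constructor
              · intro hfst
                exact hcs a ha p (by rw [PySem.Dict.get?_insert, if_pos hfst])
              · intro hsnd
                exact hcp a ha s (by rw [PySem.Dict.get?_insert, if_pos hsnd])
            · exact hcon a ha b hb
          · intro q hq p' hp'
            rcases List.mem_cons.mp hq with rfl | hq
            · rw [h1] at hp'; cases hp'
            · refine hcs q hq p' ?_
              rw [PySem.Dict.get?_insert]
              split_ifs with hh
              · rw [hh, h1] at hp'; exact absurd hp' (by simp)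
              · exact hp'
          · intro q hq s' hs'
            rcases List.mem_cons.mp hq with rfl | hq
            · rw [h2] at hs'; cases hs'
            · refine hcp q hq s' ?_
              rw [PySem.Dict.get?_insert]
              split_ifs with hh
              · rw [hh, h2] at hs'; exact absurd hs' (by simp)
              · exact hs'
        · rintro ⟨hcon, hcs, hcp⟩
          refine ⟨fun a ha b hb => hcon a (List.mem_cons_of_mem _ ha) b (List.mem_cons_of_mem _ hb), ?_, ?_⟩
          · intro q hq p' hp'
            rw [PySem.Dict.get?_insert] at hp'
            split_ifs at hp' with hh
            · -- q.1 = s, inserted value p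
              rw [← Option.some.inj hp']
              exact ((hcon ⟨s, p⟩ List.mem_cons_self q (List.mem_cons_of_mem _ hq)).1 hh.symm).symm
            · exact hcs q (List.mem_cons_of_mem _ hq) p' hp'
          · intro q hq s' hs'
            rw [PySem.Dict.get?_insert] at hs'
            split_ifs at hs' with hh
            · rw [← Option.some.inj hs']
              exact ((hcon ⟨s, p⟩ List.mem_cons_self q (List.mem_cons_of_mem _ hq)).2 hh.symm).symm
            · exact hcp q (List.mem_cons_of_mem _ hq) s' hs'
      · -- p already maps to s'; since s2p.get? s = none, s' ≠ s, so conflict: both sides false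
        have hne : s' ≠ s := by
          intro heq
          rw [heq] at h2
          have hx := (hsym s p).mpr h2
          rw [h1] at hx
          exact absurd hx (by simp)
        simp only [Option.getD_some, if_pos hne]
        constructor
        · intro hfalse; cases hfalse
        · rintro ⟨_, _, hcp⟩
          exact absurd (hcp ⟨s, p⟩ List.mem_cons_self s' h2).symm hne
    · -- s already maps to p'
      by_cases hpp : p' = p
      · subst hpp
        -- consistent: setdefault leaves s2p; p2s.get? p = some s by symmetry
        have h2 : p2s.get? p' = some s := (hsym s p').mp h1
        have hc1 : s2p.contains s = true := by
          rw [PySem.Dict.contains_eq_isSome_get?, h1]; rfl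
        have hc2 : p2s.contains p' = true := by
          rw [PySem.Dict.contains_eq_isSome_get?, h2]; rfl
        simp only [h2, Option.getD_some, ne_eq, not_true_eq_false,
          PySem.Dict.setdefault_of_contains (h := hc1), PySem.Dict.setdefault_of_contains (h := hc2),
          if_false]
        rw [ih _ _ hsym]
        constructor
        · rintro ⟨hcon, hcs, hcp⟩
          refine ⟨?_, ?_, ?_⟩
          · intro a ha b hb
            rcases List.mem_cons.mp ha with rfl | ha <;> rcases List.mem_cons.mp hb with rfl | hb
            · exact ⟨fun _ => rfl, fun _ => rfl⟩
            · exact ⟨fun hf => (hcs b hb p' (hf ▸ h1)).symm, fun hs0 => (hcp b hb s (hs0 ▸ h2)).symm⟩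
            · exact ⟨fun hf => hcs a ha p' (hf.symm ▸ h1), fun hs0 => hcp a ha s (hs0.symm ▸ h2)⟩
            · exact hcon a ha b hb
          · intro q hq px hpx
            rcases List.mem_cons.mp hq with rfl | hq
            · rw [h1] at hpx; exact Option.some.inj hpx
            · exact hcs q hq px hpx
          · intro q hq sx hsx
            rcases List.mem_cons.mp hq with rfl | hq
            · rw [h2] at hsx; exact Option.some.inj hsx
            · exact hcp q hq sx hsx
        · rintro ⟨hcon, hcs, hcp⟩
          exact ⟨fun a ha b hb => hcon a (List.mem_cons_of_mem _ ha) b (List.mem_cons_of_mem _ hb),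
            fun q hq => hcs q (List.mem_cons_of_mem _ hq),
            fun q hq => hcp q (List.mem_cons_of_mem _ hq)⟩
      · -- conflict on s
        simp only [Option.getD_some, if_pos hpp]
        constructor
        · intro hfalse; cases hfalse
        · rintro ⟨_, hcs, _⟩
          exact absurd ((hcs ⟨s, p⟩ List.mem_cons_self p' h1).symm) hpp


theorem exists_lt_bridge (g : List String) :
    (∃ j < g.length - 1, g.getD j "" ≠ g.getD (j+1) "") ↔
    (∃ j, j + 1 < g.length ∧ g.getD j "" ≠ g.getD (j+1) "") := by
  constructor
  · rintro ⟨j, hj, hm⟩; exact ⟨j, by omega, hm⟩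
  · rintro ⟨j, hj, hm⟩; exact ⟨j, by omega, hm⟩

theorem const_groups_iff (zl : List (String × String)) :
    (∀ k ∈ (zl.foldl zstep PySem.Dict.empty).keys,
        ∀ x ∈ (zl.foldl zstep PySem.Dict.empty).getD k [],
          ∀ y ∈ (zl.foldl zstep PySem.Dict.empty).getD k [], x = y) ↔
    (∀ a ∈ zl, ∀ b ∈ zl, a.1 = b.1 → a.2 = b.2) := by
  have hmem : ∀ k x, x ∈ (zl.foldl zstep PySem.Dict.empty).getD k [] ↔
      ∃ q ∈ zl, q.1 = k ∧ q.2 = x := by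
    intro k x
    rw [getD_zfold]
    simp [PySem.Dict.getD_empty, List.mem_map, List.mem_filter]
  constructor
  · intro h a ha b hb hfst
    refine h a.1 ?_ a.2 ((hmem _ _).mpr ⟨a, ha, rfl, rfl⟩) b.2 ((hmem _ _).mpr ⟨b, hb, hfst.symm, rfl⟩)
    rw [mem_keys_zfold]
    exact Or.inr ⟨a, ha, rfl⟩
  · intro h k _ x hx y hy
    obtain ⟨qx, hqx, hkx, rfl⟩ := (hmem _ _).mp hx
    obtain ⟨qy, hqy, hky, rfl⟩ := (hmem _ _).mp hy
    exact (h qx hqx qy hqy (by rw [hkx, hky]))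

theorem A_true_iff (strings patterns : List String) (h : strings.length = patterns.length) :
    areFollowingPatterns strings patterns = true ↔ Consist (strings.zip patterns) := by
  simp only [areFollowingPatterns]
  rw [aBuild_eq_zfold _ _ h, aBuild_eq_zfold _ _ h.symm, aCheck_eq, aCheck_eq]
  have hval : ∀ (P1 P2 : Prop) [Decidable P1] [Decidable P2],
      ((if (if P2 then 1 else (if P1 then (1:Nat) else 0)) == 1 then false else true) = true ↔
        (¬ P1 ∧ ¬ P2)) := by
    intro P1 P2 _ _
    by_cases h1 : P1 <;> by_cases h2 : P2 <;> simp [h1, h2]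
  rw [hval]
  have hside : ∀ zl : List (String × String),
      (¬ ∃ k ∈ (zl.foldl zstep PySem.Dict.empty).keys, ∃ j < ((zl.foldl zstep PySem.Dict.empty).getD k []).length - 1,
        ((zl.foldl zstep PySem.Dict.empty).getD k []).getD j "" ≠ ((zl.foldl zstep PySem.Dict.empty).getD k []).getD (j+1) "") ↔
      (∀ a ∈ zl, ∀ b ∈ zl, a.1 = b.1 → a.2 = b.2) := by
    intro zl
    rw [← const_groups_iff zl]
    constructor
    · intro hn k hk x hx y hy
      have : ¬ ∃ j, j + 1 < ((zl.foldl zstep PySem.Dict.empty).getD k []).length ∧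
          ((zl.foldl zstep PySem.Dict.empty).getD k []).getD j "" ≠ ((zl.foldl zstep PySem.Dict.empty).getD k []).getD (j+1) "" := by
        intro hex
        exact hn ⟨k, hk, (exists_lt_bridge _).mpr hex⟩
      exact (adj_const _).mp this x hx y hy
    · rintro hc ⟨k, hk, hex⟩
      exact (adj_const _).mpr (fun x hx y hy => hc k hk x hx y hy) ((exists_lt_bridge _).mp hex)
  rw [hside, hside]
  have hswap : (∀ a ∈ patterns.zip strings, ∀ b ∈ patterns.zip strings, a.1 = b.1 → a.2 = b.2) ↔
      (∀ a ∈ strings.zip patterns, ∀ b ∈ strings.zip patterns, a.2 = b.2 → a.1 = b.1) := by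
    constructor
    · intro hh a ha b hb h22
      exact hh (a.2, a.1) ((mem_zip_swap _ _ _ _).mpr (by simpa using ha))
        (b.2, b.1) ((mem_zip_swap _ _ _ _).mpr (by simpa using hb)) h22
    · intro hh a ha b hb h11
      exact hh (a.2, a.1) ((mem_zip_swap _ _ _ _).mp (by simpa using ha))
        (b.2, b.1) ((mem_zip_swap _ _ _ _).mp (by simpa using hb)) h11
  rw [hswap]
  unfold Consist
  constructor
  · rintro ⟨hd1, hd2⟩ a ha b hb
    exact ⟨hd1 a ha b hb, hd2 a ha b hb⟩
  · intro hc
    exact ⟨fun a ha b hb => (hc a ha b hb).1, fun a ha b hb => (hc a ha b hb).2⟩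

theorem B_true_iff (strings patterns : List String) :
    areFollowingPatterns_alt strings patterns = true ↔ Consist (strings.zip patterns) := by
  unfold areFollowingPatterns_alt
  rw [bGo_spec _ _ _ (by intro s p; simp [PySem.Dict.get?_empty])]
  simp [PySem.Dict.get?_empty]

-- ===== VERDICT (by name: the statement is the Claim_ definition above) =====
theorem areFollowingPatterns_spec : Claim_equal_areFollowingPatterns := by
  intro strings patterns _ hpre
  unfold Spec_areFollowingPatterns
  rw [Bool.eq_iff_iff, A_true_iff strings patterns hpre, B_true_iff]
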